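-- pv_equiv track=rewrite | github.com/fennih/fraitmo | pipeline/nodes/rag_threat_searcher.py | _infer_severity_from_threat_name
-- ===== SOURCE A (Python) =====
-- def _infer_severity_from_threat_name(threat_name: str) -> str:
--     """
--     Infer severity level based on threat name when not explicitly provided
--     """
--     threat_name_lower = threat_name.lower()
--
--     # Critical severity threats
--     critical_keywords = [
--         'injection', 'bypass', 'escalation', 'extraction', 'code execution',
--         'remote code', 'privilege escalation', 'authentication bypass'
--     ]
--
--     # High severity threats
--     high_keywords = [
--         'adversarial', 'poisoning', 'manipulation', 'hijacking', 'tampering',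
--         'unauthorized access', 'data breach', 'xss', 'csrf', 'sql injection'
--     ]
--
--     # Medium severity threats
--     medium_keywords = [
--         'disclosure', 'leak', 'exposure', 'bias', 'hallucination',
--         'denial of service', 'dos', 'brute force'
--     ]
--
--     # Low severity threats
--     low_keywords = [
--         'information disclosure', 'minor leak', 'configuration weakness',
--         'logging issue', 'weak cipher', 'version disclosure', 'banner disclosure',
--         'path disclosure', 'enumeration', 'fingerprinting', 'cache poisoning'
--     ]
--
--     # Check for critical threats
--     if any(keyword in threat_name_lower for keyword in critical_keywords):
--         return 'Critical'
--
--     # Check for high severity threats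
--     if any(keyword in threat_name_lower for keyword in high_keywords):
--         return 'High'
--
--     # Check for medium severity threats
--     if any(keyword in threat_name_lower for keyword in medium_keywords):
--         return 'Medium'
--
--     # Check for low severity threats
--     if any(keyword in threat_name_lower for keyword in low_keywords):
--         return 'Low'
--
--     # Default to Low for truly unknown threats (most conservative approach)
--     return 'Low'
-- ===== SOURCE B (Python) =====
-- _LEVELS = [
--     (4, ['injection', 'bypass', 'escalation', 'extraction', 'code execution',
--          'remote code', 'privilege escalation', 'authentication bypass']),
--     (3, ['adversarial', 'poisoning', 'manipulation', 'hijacking', 'tampering',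
--          'unauthorized access', 'data breach', 'xss', 'csrf', 'sql injection']),
--     (2, ['disclosure', 'leak', 'exposure', 'bias', 'hallucination',
--          'denial of service', 'dos', 'brute force']),
--     (1, ['information disclosure', 'minor leak', 'configuration weakness',
--          'logging issue', 'weak cipher', 'version disclosure', 'banner disclosure',
--          'path disclosure', 'enumeration', 'fingerprinting', 'cache poisoning']),
-- ]
-- _KEYWORD_RANKS = [(kw, rank) for rank, kws in _LEVELS for kw in kws]
-- _LABELS = ('Low', 'Medium', 'High', 'Critical')
--
--
-- def _infer_severity_from_threat_name(threat_name: str) -> str: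
--     name = threat_name.lower()
--     best = 1
--     for kw, rank in _KEYWORD_RANKS:
--         if best < rank and kw in name:
--             best = rank
--     return _LABELS[best - 1]
-- ===== Notes on version B (the rewrite author's own statement) =====
-- stated objective: idiomatic
-- what changed: Replaces the four priority-ordered any()/short-circuit checks with a single flat keyword-to-rank table scanned once, keeping the maximum matched rank and mapping it back to a label (default Low).
import Mathlib
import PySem

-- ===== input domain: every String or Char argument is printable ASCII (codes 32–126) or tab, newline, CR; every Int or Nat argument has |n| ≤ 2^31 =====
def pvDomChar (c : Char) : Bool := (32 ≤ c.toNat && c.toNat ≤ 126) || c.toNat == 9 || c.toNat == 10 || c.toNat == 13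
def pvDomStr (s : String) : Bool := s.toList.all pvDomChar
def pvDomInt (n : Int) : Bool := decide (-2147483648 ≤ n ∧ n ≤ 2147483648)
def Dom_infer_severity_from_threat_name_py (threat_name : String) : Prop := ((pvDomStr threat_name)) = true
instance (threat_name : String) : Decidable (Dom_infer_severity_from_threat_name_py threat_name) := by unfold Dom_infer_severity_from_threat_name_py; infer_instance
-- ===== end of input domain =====

-- B replaces A's four priority-ordered any() short-circuit checks by one keyword→rank table
-- scanned once keeping the maximum rank (idiomatic; same cost).

-- ===== PORT A =====
def infer_severity_from_threat_name_py (threat_name : String) : String :=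
  let threat_name_lower := PySem.Str.lower threat_name
  let critical_keywords : List String :=
    ["injection", "bypass", "escalation", "extraction", "code execution",
     "remote code", "privilege escalation", "authentication bypass"]
  let high_keywords : List String :=
    ["adversarial", "poisoning", "manipulation", "hijacking", "tampering",
     "unauthorized access", "data breach", "xss", "csrf", "sql injection"]
  let medium_keywords : List String :=
    ["disclosure", "leak", "exposure", "bias", "hallucination",
     "denial of service", "dos", "brute force"]
  let low_keywords : List String :=
    ["information disclosure", "minor leak", "configuration weakness",
     "logging issue", "weak cipher", "version disclosure", "banner disclosure",
     "path disclosure", "enumeration", "fingerprinting", "cache poisoning"]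
  if critical_keywords.any (fun keyword => PySem.Str.isIn keyword threat_name_lower) then "Critical"
  else if high_keywords.any (fun keyword => PySem.Str.isIn keyword threat_name_lower) then "High"
  else if medium_keywords.any (fun keyword => PySem.Str.isIn keyword threat_name_lower) then "Medium"
  else if low_keywords.any (fun keyword => PySem.Str.isIn keyword threat_name_lower) then "Low"
  else "Low"

-- ===== PORT B =====
-- Source B's module-level table: the comprehension over _LEVELS flattens to four mapped segments
def pvKeywordRanks : List (String × Nat) :=
  (["injection", "bypass", "escalation", "extraction", "code execution",
    "remote code", "privilege escalation", "authentication bypass"].map (fun kw => (kw, 4)))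
  ++ (["adversarial", "poisoning", "manipulation", "hijacking", "tampering",
       "unauthorized access", "data breach", "xss", "csrf", "sql injection"].map (fun kw => (kw, 3)))
  ++ (["disclosure", "leak", "exposure", "bias", "hallucination",
       "denial of service", "dos", "brute force"].map (fun kw => (kw, 2)))
  ++ (["information disclosure", "minor leak", "configuration weakness",
       "logging issue", "weak cipher", "version disclosure", "banner disclosure",
       "path disclosure", "enumeration", "fingerprinting", "cache poisoning"].map (fun kw => (kw, 1)))

def pvLabels : List String := ["Low", "Medium", "High", "Critical"]

def infer_severity_from_threat_name_py_alt (threat_name : String) : String :=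
  let name := PySem.Str.lower threat_name
  let best := pvKeywordRanks.foldl
    (fun best p => if best < p.2 && PySem.Str.isIn p.1 name then p.2 else best) 1
  pvLabels.getD (best - 1) "Low"

-- ===== PRECONDITION & SPEC =====
def Spec_infer_severity_from_threat_name_py (threat_name : String) (out : String) : Prop := out = infer_severity_from_threat_name_py_alt threat_name
instance (threat_name : String) (out : String) : Decidable (Spec_infer_severity_from_threat_name_py threat_name out) := by unfold Spec_infer_severity_from_threat_name_py; infer_instance

-- ===== CLAIM (what is proved, stated in full; the proofs are below) =====
def Claim_equal_infer_severity_from_threat_name_py : Prop := ∀ (threat_name : String), Dom_infer_severity_from_threat_name_py threat_name → Spec_infer_severity_from_threat_name_py threat_name (infer_severity_from_threat_name_py threat_name)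

-- ===== LEMMAS AND PROOFS =====

-- folding B's max-step over a constant-rank segment is 'rank if any keyword matches and beats the accumulator'
lemma pv_fold_const (s : String) (r : Nat) (kws : List String) (b : Nat) :
    ((kws.map (fun kw => (kw, r))).foldl
      (fun best p => if best < p.2 && PySem.Str.isIn p.1 s then p.2 else best) b)
    = if b < r && kws.any (fun kw => PySem.Str.isIn kw s) then r else b := by
  induction kws generalizing b with
  | nil => simp
  | cons k t ih =>
    simp only [List.map_cons, List.foldl_cons, List.any_cons, ih]
    by_cases hin : PySem.Str.isIn k s = true <;>
      by_cases hb : b < r <;>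
        simp only [PySem.Str.isIn_eq] at hin <;>
          simp [hin, hb]

-- ===== VERDICT (by name: the statement is the Claim_ definition above) =====
theorem infer_severity_from_threat_name_py_spec : Claim_equal_infer_severity_from_threat_name_py := by
  intro t _
  unfold Spec_infer_severity_from_threat_name_py
  unfold infer_severity_from_threat_name_py infer_severity_from_threat_name_py_alt pvKeywordRanks
  simp only [List.foldl_append, pv_fold_const]
  generalize (["injection", "bypass", "escalation", "extraction", "code execution",
      "remote code", "privilege escalation", "authentication bypass"] : List String).any
      (fun kw => PySem.Str.isIn kw (PySem.Str.lower t)) = c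
  generalize (["adversarial", "poisoning", "manipulation", "hijacking", "tampering",
      "unauthorized access", "data breach", "xss", "csrf", "sql injection"] : List String).any
      (fun kw => PySem.Str.isIn kw (PySem.Str.lower t)) = h
  generalize (["disclosure", "leak", "exposure", "bias", "hallucination",
      "denial of service", "dos", "brute force"] : List String).any
      (fun kw => PySem.Str.isIn kw (PySem.Str.lower t)) = m
  generalize (["information disclosure", "minor leak", "configuration weakness",
      "logging issue", "weak cipher", "version disclosure", "banner disclosure",
      "path disclosure", "enumeration", "fingerprinting", "cache poisoning"] : List String).any
      (fun kw => PySem.Str.isIn kw (PySem.Str.lower t)) = l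
  revert c h m l
  decide
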